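-- pv_equiv track=rewrite | github.com/tivarus/iu4-2k24-python | ngo_d_k/task02/src/task02/task02.py | generate_union_list
-- ===== SOURCE A (Python) =====
-- from enum import Enum
-- from typing import List
--
-- class FS_Elements_List_IDs(Enum):
--     PATH = 0
--     TYPE = 1
--
-- class Paths_Types(Enum):
--     FILE = 0
--     DIRRECTORY = 1
--
-- def generate_union_list(
--     dirnames: List[str], filenames: List[str]
-- ) -> List[List]:
--     result_list: List[List] = []
--
--     for dirname in dirnames:
--         result_list.append([dirname, Paths_Types.DIRRECTORY.value])
--     for filename in filenames:
--         result_list.append([filename, Paths_Types.FILE.value])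
--
--     result_list.sort(
--         key=lambda arr: arr[FS_Elements_List_IDs.PATH.value], reverse=False
--     )  # by name
--
--     return result_list
-- ===== SOURCE B (Python) =====
-- def generate_union_list(dirnames, filenames):
--     dpairs = [[d, 1] for d in sorted(dirnames)]
--     fpairs = [[f, 0] for f in sorted(filenames)]
--     out = []
--     i = j = 0
--     while i < len(dpairs) and j < len(fpairs):
--         if dpairs[i][0] <= fpairs[j][0]:
--             out.append(dpairs[i])
--             i += 1
--         else:
--             out.append(fpairs[j])
--             j += 1
--     out.extend(dpairs[i:])
--     out.extend(fpairs[j:])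
--     return out
-- ===== Notes on version B (the rewrite author's own statement) =====
-- stated objective: alternative
-- what changed: A appends dir/file pairs into one list and runs a single stable sort with key name; B sorts dirnames and filenames separately (plain string sorts, no key function) and combines the two sorted tagged lists with a linear two-pointer merge (ties take the dir pair), eliminating the combined keyed sort.
import Mathlib
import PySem

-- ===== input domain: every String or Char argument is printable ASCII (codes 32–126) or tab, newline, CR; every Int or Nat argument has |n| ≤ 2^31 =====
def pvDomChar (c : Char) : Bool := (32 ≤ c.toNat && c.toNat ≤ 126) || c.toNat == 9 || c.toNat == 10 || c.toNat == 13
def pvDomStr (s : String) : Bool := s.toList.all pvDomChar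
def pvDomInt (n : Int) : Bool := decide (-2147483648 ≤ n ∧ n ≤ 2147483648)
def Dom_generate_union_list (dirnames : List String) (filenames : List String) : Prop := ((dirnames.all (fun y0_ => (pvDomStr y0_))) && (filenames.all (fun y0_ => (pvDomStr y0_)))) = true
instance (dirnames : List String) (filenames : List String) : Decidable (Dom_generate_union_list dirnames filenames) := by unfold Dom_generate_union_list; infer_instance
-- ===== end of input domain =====

-- B replaces A's single stable sort of the tagged concatenation by two sorts plus a linear
-- two-way merge (dirs win ties); alternative decomposition, same exact output.

-- ===== PORT A =====
def generate_union_list (dirnames : List String) (filenames : List String) : List (String × Int) :=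
  -- result_list = []; for dirname in dirnames: append [dirname, 1]; for filename in filenames: append [filename, 0]
  let result1 := dirnames.foldl (fun acc d => acc ++ [(d, (1 : Int))]) []
  let result2 := filenames.foldl (fun acc f => acc ++ [(f, (0 : Int))]) result1
  -- result_list.sort(key=lambda arr: arr[0], reverse=False)
  PySem.List.sorted result2 (fun arr => arr.1) false

-- ===== PORT B =====
-- the while-loop two-pointer merge of Source B (<= takes from dpairs, ties included)
def pvMergeB : List (String × Int) → List (String × Int) → List (String × Int)
  | [], fpairs => fpairs
  | dpairs, [] => dpairs
  | d :: dpairs, f :: fpairs =>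
    if d.1 ≤ f.1 then d :: pvMergeB dpairs (f :: fpairs)
    else f :: pvMergeB (d :: dpairs) fpairs

def generate_union_list_alt (dirnames : List String) (filenames : List String) : List (String × Int) :=
  let dpairs := (PySem.List.sorted dirnames (fun s => s) false).map (fun d => (d, (1 : Int)))
  let fpairs := (PySem.List.sorted filenames (fun s => s) false).map (fun f => (f, (0 : Int)))
  pvMergeB dpairs fpairs

-- ===== PRECONDITION & SPEC =====
def Spec_generate_union_list (dirnames : List String) (filenames : List String) (out : List (String × Int)) : Prop := out = generate_union_list_alt dirnames filenames
instance (dirnames : List String) (filenames : List String) (out : List (String × Int)) : Decidable (Spec_generate_union_list dirnames filenames out) := by unfold Spec_generate_union_list; infer_instance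

-- ===== CLAIM (what is proved, stated in full; the proofs are below) =====
def Claim_equal_generate_union_list : Prop := ∀ (dirnames : List String) (filenames : List String), Dom_generate_union_list dirnames filenames → Spec_generate_union_list dirnames filenames (generate_union_list dirnames filenames)

-- ===== LEMMAS AND PROOFS =====

theorem pv_bf_eq : (fun (a b : String × Int) => decide (a.1 < b.1))
    = (fun a b => decide (a.1.toList < b.1.toList)) := by
  funext a b; rw [decide_eq_decide]; exact String.lt_iff_toList_lt

theorem pv_bfS_eq : (fun (a b : String) => decide (a < b))
    = (fun a b => decide (a.toList < b.toList)) := by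
  funext a b; rw [decide_eq_decide]; exact String.lt_iff_toList_lt

-- insert-before-equals (insertion from the right); PySem's insertBy inserts after equals.
def pvInsB (x : String × Int) : List (String × Int) → List (String × Int)
  | [] => [x]
  | y :: ys => if x.1 ≤ y.1 then x :: y :: ys else y :: pvInsB x ys

-- single-step commutation of insert-after (z) with insert-before (x)
theorem pv_ins_comm (ms : List (String × Int)) (x z : String × Int) :
    PySem.List.insertBy (fun a b => decide ((a : String × Int).1 < b.1)) z (pvInsB x ms)
      = pvInsB x (PySem.List.insertBy (fun a b => decide ((a : String × Int).1 < b.1)) z ms) := by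
  induction ms with
  | nil =>
      by_cases h : z.1.toList < x.1.toList
      · simp [pvInsB, PySem.List.insertBy, String.lt_iff_toList_lt, String.le_iff_toList_le,
          h, not_le.mpr h]
      · simp [pvInsB, PySem.List.insertBy, String.lt_iff_toList_lt, String.le_iff_toList_le,
          h, not_lt.mp h]
  | cons m ms ih =>
      by_cases h1 : x.1.toList ≤ m.1.toList
      · by_cases h2 : z.1.toList < x.1.toList
        · simp [pvInsB, PySem.List.insertBy, String.lt_iff_toList_lt, String.le_iff_toList_le,
            h1, h2, lt_of_lt_of_le h2 h1, not_le.mpr h2]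
        · by_cases h3 : z.1.toList < m.1.toList
          · simp [pvInsB, PySem.List.insertBy, String.lt_iff_toList_lt, String.le_iff_toList_le,
              h1, h2, h3, not_lt.mp h2]
          · simp [pvInsB, PySem.List.insertBy, String.lt_iff_toList_lt, String.le_iff_toList_le,
              h1, h2, h3]
      · by_cases h3 : z.1.toList < m.1.toList
        · simp [pvInsB, PySem.List.insertBy, String.lt_iff_toList_lt, String.le_iff_toList_le,
            h1, h3, not_le.mpr (lt_trans h3 (not_le.mp h1))]
        · rw [pv_bf_eq] at ih
          simp [pvInsB, PySem.List.insertBy, String.lt_iff_toList_lt, String.le_iff_toList_le,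
            h1, h3, ih]

theorem pv_foldl_comm (zs : List (String × Int)) (ms : List (String × Int)) (x : String × Int) :
    zs.foldl (fun acc z => PySem.List.insertBy (fun a b => decide ((a : String × Int).1 < b.1)) z acc) (pvInsB x ms)
      = pvInsB x (zs.foldl (fun acc z => PySem.List.insertBy (fun a b => decide ((a : String × Int).1 < b.1)) z acc) ms) := by
  induction zs generalizing ms with
  | nil => rfl
  | cons z zs ih => simp only [List.foldl_cons, pv_ins_comm, ih]

-- the stable sort by name is the right fold of insert-before-equals
theorem pv_sorted_foldr (xs : List (String × Int)) :
    PySem.List.sorted xs (fun arr => arr.1) false = xs.foldr pvInsB [] := by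
  induction xs with
  | nil => rfl
  | cons x xs ih =>
      rw [PySem.List.sorted_eq_foldl_insertBy] at *
      simpa using (pv_foldl_comm xs [] x).trans (congrArg (pvInsB x) ih)

theorem pv_merge_nil_right (xs : List (String × Int)) : pvMergeB xs [] = xs := by
  cases xs <;> simp [pvMergeB]

theorem pv_insB_merge_nil (SB : List (String × Int)) (a : String × Int) :
    pvInsB a SB = pvMergeB [a] SB := by
  induction SB with
  | nil => simp [pvInsB, pv_merge_nil_right]
  | cons q SB ih =>
      by_cases h : a.1.toList ≤ q.1.toList <;>
        simp [pvInsB, pvMergeB, String.le_iff_toList_le, h, ih]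

-- merge absorbs insert-before on its left argument
theorem pv_insB_merge (SA : List (String × Int)) :
    ∀ (SB : List (String × Int)) (a : String × Int),
      pvInsB a (pvMergeB SA SB) = pvMergeB (pvInsB a SA) SB := by
  induction SA with
  | nil =>
      intro SB a
      have h0 : pvMergeB [] SB = SB := by simp [pvMergeB]
      rw [h0, pv_insB_merge_nil]
      simp [pvInsB]
  | cons s SA ih1 =>
      intro SB
      induction SB with
      | nil => intro a; simp [pv_merge_nil_right]
      | cons q SB ih2 =>
          intro a
          by_cases h1 : s.1.toList ≤ q.1.toList
          · by_cases h2 : a.1.toList ≤ s.1.toList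
            · simp [pvInsB, pvMergeB, String.le_iff_toList_le, h1, h2, le_trans h2 h1]
            · simp [pvInsB, pvMergeB, String.le_iff_toList_le, h1, h2, ih1]
          · by_cases h2 : a.1.toList ≤ q.1.toList
            · have hs : a.1.toList ≤ s.1.toList := le_trans h2 (not_le.mp h1).le
              simp [pvInsB, pvMergeB, String.le_iff_toList_le, h1, h2, hs]
            · have key : pvMergeB (pvInsB a (s :: SA)) (q :: SB)
                  = q :: pvMergeB (pvInsB a (s :: SA)) SB := by
                by_cases h3 : a.1.toList ≤ s.1.toList <;>
                  simp [pvInsB, pvMergeB, String.le_iff_toList_le, h1, h2, h3]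
              rw [key, ← ih2 a]
              simp [pvInsB, pvMergeB, String.le_iff_toList_le, h1, h2]

theorem pv_sort_append_merge (A B : List (String × Int)) :
    PySem.List.sorted (A ++ B) (fun arr => arr.1) false
      = pvMergeB (PySem.List.sorted A (fun arr => arr.1) false)
                 (PySem.List.sorted B (fun arr => arr.1) false) := by
  induction A with
  | nil => simp [PySem.List.sorted_eq_foldl_insertBy, pvMergeB]
  | cons a A ih =>
      rw [List.cons_append, pv_sorted_foldr, List.foldr_cons, ← pv_sorted_foldr, ih,
        pv_insB_merge, pv_sorted_foldr A, ← List.foldr_cons (f := pvInsB), ← pv_sorted_foldr]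

-- sorting constant-tagged pairs by name = sorting the names, then tagging
theorem pv_ins_map (c : Int) (x : String) (ms : List String) :
    PySem.List.insertBy (fun a b => decide ((a : String × Int).1 < b.1)) (x, c)
        (ms.map (fun d => (d, c)))
      = (PySem.List.insertBy (fun a b => decide ((a : String) < b)) x ms).map (fun d => (d, c)) := by
  induction ms with
  | nil => rfl
  | cons m ms ih =>
      rw [pv_bf_eq, pv_bfS_eq] at ih
      by_cases h : x.toList < m.toList <;>
        simp [PySem.List.insertBy, String.lt_iff_toList_lt, h, ih]

theorem pv_sorted_map (c : Int) (A : List String) :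
    PySem.List.sorted (A.map (fun d => (d, c))) (fun arr => arr.1) false
      = (PySem.List.sorted A (fun s => s) false).map (fun d => (d, c)) := by
  rw [PySem.List.sorted_eq_foldl_insertBy, PySem.List.sorted_eq_foldl_insertBy, List.foldl_map]
  suffices h : ∀ (ms : List String),
      A.foldl (fun acc d => PySem.List.insertBy (fun a b => decide ((a : String × Int).1 < b.1)) (d, c) acc)
          (ms.map (fun d => (d, c)))
        = (A.foldl (fun acc d => PySem.List.insertBy (fun a b => decide ((a : String) < b)) d acc) ms).map
            (fun d => (d, c)) by
    simpa using h []
  induction A with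
  | nil => intro ms; rfl
  | cons a A ih => intro ms; simp only [List.foldl_cons, pv_ins_map, ih]

-- A's two append loops build the tagged concatenation
theorem pv_loops_eq (dirnames filenames : List String) :
    filenames.foldl (fun acc f => acc ++ [(f, (0 : Int))])
        (dirnames.foldl (fun acc d => acc ++ [(d, (1 : Int))]) [])
      = dirnames.map (fun d => (d, (1 : Int))) ++ filenames.map (fun f => (f, (0 : Int))) := by
  rw [PySem.List.foldl_append_singleton_eq_map, PySem.List.foldl_append_singleton_eq_map,
    List.nil_append]

-- ===== VERDICT (by name: the statement is the Claim_ definition above) =====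
theorem generate_union_list_spec : Claim_equal_generate_union_list := by
  intro dirnames filenames _
  show generate_union_list dirnames filenames = generate_union_list_alt dirnames filenames
  show PySem.List.sorted
      (filenames.foldl (fun acc f => acc ++ [(f, (0 : Int))])
        (dirnames.foldl (fun acc d => acc ++ [(d, (1 : Int))]) []))
      (fun arr => arr.1) false
    = pvMergeB ((PySem.List.sorted dirnames (fun s => s) false).map (fun d => (d, (1 : Int))))
        ((PySem.List.sorted filenames (fun s => s) false).map (fun f => (f, (0 : Int))))
  rw [pv_loops_eq, pv_sort_append_merge, pv_sorted_map, pv_sorted_map]
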